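-- pv_equiv track=rewrite | github.com/Aqib773/klovercloud | task2.py | solution
-- ===== SOURCE A (Python) =====
-- def solution(X, A):
--     if X < 1 or len(A) < 1:
--         return -1
--     try:
--         found = max([ A.index(element) for element in range(1, X + 1) ])
--     except ValueError:
--         return -1
--     return  found
-- ===== SOURCE B (Python) =====
-- def solution(X, A):
--     if X < 1:
--         return -1
--     need = X
--     seen = set()
--     for i, v in enumerate(A):
--         if 1 <= v <= X and v not in seen:
--             seen.add(v)
--             need -= 1
--             if need == 0:
--                 return i
--     return -1
-- ===== Notes on version B (the rewrite author's own statement) =====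
-- stated objective: alternative
-- what changed: B replaces A's 'max of per-value A.index scans' with the online frog-river algorithm: one left-to-right pass counting distinct values in 1..X seen so far, returning the index at which that count first reaches X (the crossing point equals the max first-occurrence index), -1 if the pass ends without reaching X.
import Mathlib
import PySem

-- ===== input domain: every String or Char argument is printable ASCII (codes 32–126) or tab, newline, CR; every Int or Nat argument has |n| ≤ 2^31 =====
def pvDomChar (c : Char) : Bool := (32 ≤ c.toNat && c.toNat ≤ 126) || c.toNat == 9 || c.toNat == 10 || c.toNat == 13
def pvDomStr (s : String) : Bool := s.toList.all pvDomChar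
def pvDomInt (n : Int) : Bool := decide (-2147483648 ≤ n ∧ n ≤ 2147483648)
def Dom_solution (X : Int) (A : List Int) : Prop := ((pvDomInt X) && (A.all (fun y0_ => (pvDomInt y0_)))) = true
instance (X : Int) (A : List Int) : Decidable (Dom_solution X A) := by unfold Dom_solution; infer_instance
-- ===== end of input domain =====

-- B replaces A's max-of-first-occurrence-index scans by the online single-pass
-- "count distinct needed values of 1..X seen so far, return at the crossing point" algorithm (alternative strategy; not measured faster).

-- ===== PORT A =====
-- the comprehension [A.index(e) for e in range(1, X+1)], iterated lazily like Python's range: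
-- none = some e missing (A.index raised ValueError, aborting the comprehension)
def pvIdxList (A : List Int) (e X : Int) : Option (List Int) :=
  if _h : e ≤ X then
    match PySem.List.index? A e, pvIdxList A (e + 1) X with
    | some i, some l => some ((i : Int) :: l)
    | _, _ => none
  else some []
termination_by (X + 1 - e).toNat
decreasing_by omega

def solution (X : Int) (A : List Int) : Int :=
  if X < 1 ∨ A.length < 1 then -1
  else
    match pvIdxList A 1 X with
    | none => -1                       -- ValueError from A.index
    | some l =>
      match PySem.List.max? l (fun y => y) with
      | none => -1                     -- ValueError from max([])
      | some m => m

-- ===== PORT B =====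
-- the 'for i, v in enumerate(A)' loop: seen = set of in-range values met, need = X - len(seen)
def pvRiver (X : Int) (seen : PySem.Set Int) (need : Int) (i : Int) : List Int → Int
  | [] => -1
  | v :: t =>
    if 1 ≤ v ∧ v ≤ X ∧ ¬ (PySem.Set.contains seen v = true) then
      if need - 1 = 0 then i
      else pvRiver X (PySem.Set.add seen v) (need - 1) (i + 1) t
    else pvRiver X seen need (i + 1) t

def solution_alt (X : Int) (A : List Int) : Int :=
  if X < 1 then -1
  else pvRiver X PySem.Set.empty X 0 A

-- ===== PRECONDITION & SPEC =====
def Spec_solution (X : Int) (A : List Int) (out : Int) : Prop := out = solution_alt X A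
instance (X : Int) (A : List Int) (out : Int) : Decidable (Spec_solution X A out) := by unfold Spec_solution; infer_instance

-- ===== CLAIM (what is proved, stated in full; the proofs are below) =====
def Claim_equal_solution : Prop := ∀ (X : Int) (A : List Int), Dom_solution X A → Spec_solution X A (solution X A)

-- ===== LEMMAS AND PROOFS =====

-- proof-side reference: the still-missing values of 1..X given the seen-set
def pvMiss (X : Int) (seen : PySem.Set Int) : List Int :=
  (PySem.List.pyRange 1 (X + 1) 1).filter (fun v => ! PySem.Set.contains seen v)

-- proof-side reference: index (into t) at which the last element of miss is first collected
def pvLego (miss : List Int) : List Int → Option Nat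
  | [] => none
  | v :: t =>
    if miss.erase v = [] then some 0
    else (pvLego (miss.erase v) t).map (· + 1)

theorem pvMiss_mem (X : Int) (seen : PySem.Set Int) (v : Int) :
    v ∈ pvMiss X seen ↔ 1 ≤ v ∧ v ≤ X ∧ ¬ (PySem.Set.contains seen v = true) := by
  unfold pvMiss
  simp [List.mem_filter, PySem.List.mem_pyRange_one]
  tauto

theorem pvMiss_nodup (X : Int) (seen : PySem.Set Int) : (pvMiss X seen).Nodup :=
  (PySem.List.nodup_pyRange_one 1 (X + 1)).filter _

theorem pvContains_add (s : PySem.Set Int) (v w : Int) (h : ¬ (PySem.Set.contains s v = true)) :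
    PySem.Set.contains (PySem.Set.add s v) w = (PySem.Set.contains s w || w == v) := by
  simp only [PySem.Set.add, PySem.Set.contains] at *
  rw [if_neg (by simpa using h)]
  by_cases hw : w = v <;> simp [hw, List.mem_append]

theorem pvMiss_add (X v : Int) (seen : PySem.Set Int)
    (h : ¬ (PySem.Set.contains seen v = true)) :
    pvMiss X (PySem.Set.add seen v) = (pvMiss X seen).erase v := by
  unfold pvMiss
  rw [List.Nodup.erase_eq_filter ((PySem.List.nodup_pyRange_one 1 (X + 1)).filter _) v,
      List.filter_filter]
  apply List.filter_congr
  intro w _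
  rw [pvContains_add seen v w h]
  by_cases hw : w = v <;> cases hcw : PySem.Set.contains seen w <;> simp_all [bne]

theorem pvRiver_eq_lego (X : Int) (t : List Int) : ∀ (seen : PySem.Set Int) (i : Int),
    pvMiss X seen ≠ [] →
    pvRiver X seen ((pvMiss X seen).length : Int) i t
      = match pvLego (pvMiss X seen) t with
        | some j => i + (j : Int)
        | none => -1 := by
  induction t with
  | nil => intro seen i h; simp [pvRiver, pvLego]
  | cons v t ih =>
    intro seen i h
    by_cases hc : 1 ≤ v ∧ v ≤ X ∧ ¬ (PySem.Set.contains seen v = true)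
    · have hv : v ∈ pvMiss X seen := (pvMiss_mem X seen v).2 hc
      have hlen : ((pvMiss X seen).erase v).length = (pvMiss X seen).length - 1 :=
        List.length_erase_of_mem hv
      have hadd : pvMiss X (PySem.Set.add seen v) = (pvMiss X seen).erase v :=
        pvMiss_add X v seen hc.2.2
      have hpos : 0 < (pvMiss X seen).length := List.length_pos_of_ne_nil h
      by_cases he : (pvMiss X seen).erase v = []
      · have h0 : ((pvMiss X seen).length : Int) - 1 = 0 := by
          have h1 := hlen; rw [he] at h1; simp at h1; omega
        simp only [pvRiver, pvLego, if_pos hc, if_pos h0, if_pos he]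
        simp
      · have hepos : 0 < ((pvMiss X seen).erase v).length := List.length_pos_of_ne_nil he
        have h0 : ¬ (((pvMiss X seen).length : Int) - 1 = 0) := by omega
        have hcast : ((pvMiss X seen).length : Int) - 1 = (((pvMiss X seen).erase v).length : Int) := by
          omega
        have hrec := ih (PySem.Set.add seen v) (i + 1) (by rw [hadd]; exact he)
        rw [hadd] at hrec
        simp only [pvRiver, pvLego, if_pos hc, if_neg h0, if_neg he]
        rw [hcast, hrec]
        cases pvLego ((pvMiss X seen).erase v) t <;> (simp; try ring)
    · have hv : v ∉ pvMiss X seen := fun hm => hc ((pvMiss_mem X seen v).1 hm)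
      have he : (pvMiss X seen).erase v = pvMiss X seen := List.erase_of_not_mem hv
      simp only [pvRiver, pvLego, if_neg hc, he, if_neg h]
      rw [ih seen (i + 1) h]
      cases pvLego (pvMiss X seen) t <;> (simp; try ring)

theorem pvLego_char (t : List Int) : ∀ (miss : List Int), miss.Nodup → miss ≠ [] →
    (pvLego miss t = none → ∃ v ∈ miss, PySem.List.index? t v = none) ∧
    (∀ j, pvLego miss t = some j →
       (∀ v ∈ miss, ∃ k, PySem.List.index? t v = some k ∧ k ≤ j) ∧
       (∃ v ∈ miss, PySem.List.index? t v = some j)) := by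
  induction t with
  | nil =>
    intro miss hnd hne
    refine ⟨fun _ => ?_, fun j hj => by simp [pvLego] at hj⟩
    rcases List.exists_mem_of_ne_nil miss hne with ⟨v, hv⟩
    exact ⟨v, hv, by simp [PySem.List.index?, List.idxOf?]⟩
  | cons v t ih =>
    intro miss hnd hne
    by_cases he : miss.erase v = []
    · -- miss = [v]
      have hvm : v ∈ miss := by
        by_contra hvm
        exact hne (by rw [← List.erase_of_not_mem hvm]; exact he)
      have hone : miss.length = 1 := by
        have := List.length_erase_of_mem hvm
        rw [he] at this; simp at this
        have := List.length_pos_of_ne_nil hne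
        omega
      have hmiss : miss = [v] := by
        rcases List.length_eq_one_iff.1 hone with ⟨a, ha⟩
        rw [ha] at hvm ⊢
        simp at hvm; rw [hvm]
      constructor
      · intro habs; simp [pvLego, he] at habs
      · intro j hj
        simp [pvLego, he] at hj
        have hj0 : j = 0 := by omega
        subst hj0
        subst hmiss
        refine ⟨fun w hw => ?_, ⟨v, by simp, PySem.List.index?_cons_self v t⟩⟩
        simp at hw
        rw [hw]
        exact ⟨0, PySem.List.index?_cons_self v t, Nat.le_refl 0⟩
    · have hnd' : (miss.erase v).Nodup := hnd.erase v
      have ihm := ih (miss.erase v) hnd' he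
      constructor
      · intro hnone
        simp only [pvLego, if_neg he, Option.map_eq_none_iff] at hnone
        rcases ihm.1 hnone with ⟨w, hw, hwn⟩
        have hwv : w ≠ v := (List.Nodup.mem_erase_iff hnd).1 hw |>.1
        refine ⟨w, (List.mem_of_mem_erase hw), ?_⟩
        rw [PySem.List.index?_cons_of_ne t (fun hh => hwv hh.symm), hwn]
        rfl
      · intro j hj
        simp only [pvLego, if_neg he] at hj
        rcases Option.map_eq_some_iff.1 hj with ⟨j', hj', hjj⟩
        rcases ihm.2 j' hj' with ⟨hall, w0, hw0, hw0i⟩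
        constructor
        · intro w hw
          by_cases hwv : w = v
          · subst hwv
            exact ⟨0, PySem.List.index?_cons_self w t, by omega⟩
          · have hw' : w ∈ miss.erase v := (List.Nodup.mem_erase_iff hnd).2 ⟨hwv, hw⟩
            rcases hall w hw' with ⟨k, hk, hkle⟩
            refine ⟨k + 1, ?_, by omega⟩
            rw [PySem.List.index?_cons_of_ne t (fun hh => hwv hh.symm), hk]
            rfl
        · have hwv : w0 ≠ v := (List.Nodup.mem_erase_iff hnd).1 hw0 |>.1
          refine ⟨w0, List.mem_of_mem_erase hw0, ?_⟩
          rw [PySem.List.index?_cons_of_ne t (fun hh => hwv hh.symm), hw0i, ← hjj]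
          rfl

theorem pvIdxList_none (A : List Int) (X : Int) : ∀ (e : Int),
    (pvIdxList A e X = none ↔ ∃ v, e ≤ v ∧ v ≤ X ∧ PySem.List.index? A v = none) := by
  suffices key : ∀ (n : Nat) (e : Int), (X + 1 - e).toNat = n →
      (pvIdxList A e X = none ↔ ∃ v, e ≤ v ∧ v ≤ X ∧ PySem.List.index? A v = none) from
    fun e => key _ e rfl
  intro n
  induction n with
  | zero =>
    intro e hn
    have hv : ¬ e ≤ X := by omega
    rw [pvIdxList, dif_neg hv]
    constructor
    · intro h; simp at h
    · rintro ⟨v, h1, h2, _⟩; exact absurd (h1.trans h2) hv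
  | succ n ih =>
    intro e hn
    have he : e ≤ X := by omega
    rw [pvIdxList, dif_pos he]
    have ih' := ih (e + 1) (by omega)
    cases hA : PySem.List.index? A e with
    | none =>
      cases hrec : pvIdxList A (e + 1) X with
      | none => exact ⟨fun _ => ⟨e, le_refl e, he, hA⟩, fun _ => rfl⟩
      | some l => exact ⟨fun _ => ⟨e, le_refl e, he, hA⟩, fun _ => rfl⟩
    | some i =>
      cases hrec : pvIdxList A (e + 1) X with
      | none =>
        constructor
        · intro _
          rcases ih'.1 hrec with ⟨v, h1, h2, hvn⟩
          exact ⟨v, by omega, h2, hvn⟩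
        · intro _; rfl
      | some l =>
        constructor
        · intro h; simp at h
        · rintro ⟨v, h1, h2, hvn⟩
          exfalso
          by_cases hv : v = e
          · subst hv; rw [hA] at hvn; simp at hvn
          · have h0 : pvIdxList A (e + 1) X = none := ih'.2 ⟨v, by omega, h2, hvn⟩
            rw [hrec] at h0; simp at h0

theorem pvIdxList_mem (A : List Int) (X : Int) : ∀ (e : Int) (l : List Int),
    pvIdxList A e X = some l →
    ∀ x, (x ∈ l ↔ ∃ v k, e ≤ v ∧ v ≤ X ∧ PySem.List.index? A v = some k ∧ x = (k : Int)) := by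
  suffices key : ∀ (n : Nat) (e : Int) (l : List Int), (X + 1 - e).toNat = n →
      pvIdxList A e X = some l →
      ∀ x, (x ∈ l ↔ ∃ v k, e ≤ v ∧ v ≤ X ∧ PySem.List.index? A v = some k ∧ x = (k : Int)) from
    fun e l => key _ e l rfl
  intro n
  induction n with
  | zero =>
    intro e l hn hl x
    have hv : ¬ e ≤ X := by omega
    rw [pvIdxList, dif_neg hv] at hl
    injection hl with hl
    subst hl
    constructor
    · intro h; simp at h
    · rintro ⟨v, k, h1, h2, _, _⟩; exact absurd (h1.trans h2) hv
  | succ n ih =>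
    intro e l hn hl x
    have he : e ≤ X := by omega
    rw [pvIdxList, dif_pos he] at hl
    cases hA : PySem.List.index? A e with
    | none =>
      rw [hA] at hl
      cases hrec : pvIdxList A (e + 1) X <;> rw [hrec] at hl <;> simp at hl
    | some i =>
      rw [hA] at hl
      cases hrec : pvIdxList A (e + 1) X with
      | none => rw [hrec] at hl; simp at hl
      | some l' =>
        rw [hrec] at hl
        injection hl with hl
        subst hl
        have ih' := ih (e + 1) l' (by omega) hrec
        constructor
        · intro hx
          rcases List.mem_cons.1 hx with hx | hx
          · exact ⟨e, i, le_refl e, he, hA, hx⟩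
          · rcases (ih' x).1 hx with ⟨v, k, h1, h2, hk, hxk⟩
            exact ⟨v, k, by omega, h2, hk, hxk⟩
        · rintro ⟨v, k, h1, h2, hk, hxk⟩
          by_cases hv : v = e
          · subst hv
            rw [hA] at hk
            injection hk with hk
            subst hk
            exact List.mem_cons.2 (Or.inl hxk)
          · exact List.mem_cons.2 (Or.inr ((ih' x).2 ⟨v, k, by omega, h2, hk, hxk⟩))

-- ===== VERDICT (by name: the statement is the Claim_ definition above) =====
theorem solution_spec : Claim_equal_solution := by
  intro X A _
  unfold Spec_solution solution solution_alt
  by_cases hX : X < 1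
  · rw [if_pos (Or.inl hX), if_pos hX]
  · rw [if_neg hX]
    by_cases hnil : A = []
    · rw [if_pos (Or.inr (by simp [hnil]))]
      subst hnil
      simp [pvRiver]
    · rw [if_neg (by simp [hX]; cases A <;> simp_all)]
      have h1X : 1 ≤ X := by omega
      have hm0 : pvMiss X PySem.Set.empty = PySem.List.pyRange 1 (X + 1) 1 := by
        unfold pvMiss
        simp [PySem.Set.empty, PySem.Set.contains]
      have hlen : ((pvMiss X PySem.Set.empty).length : Int) = X := by
        rw [hm0, PySem.List.length_pyRange_one]
        omega
      have hne : pvMiss X PySem.Set.empty ≠ [] := by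
        intro h0
        rw [h0] at hlen
        simp at hlen
        omega
      have hriver := pvRiver_eq_lego X A PySem.Set.empty 0 hne
      rw [hlen] at hriver
      rw [hriver]
      have hnd : (pvMiss X PySem.Set.empty).Nodup := pvMiss_nodup X _
      have hchar := pvLego_char A (pvMiss X PySem.Set.empty) hnd hne
      have hmemR : ∀ v, v ∈ pvMiss X PySem.Set.empty ↔ 1 ≤ v ∧ v ≤ X := by
        intro v
        rw [pvMiss_mem]
        simp [PySem.Set.empty, PySem.Set.contains]
      cases hidx : pvIdxList A 1 X with
      | none =>
        rcases (pvIdxList_none A X 1).1 hidx with ⟨v, h1, h2, hvnone⟩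
        cases hlego : pvLego (pvMiss X PySem.Set.empty) A with
        | none => rfl
        | some j =>
          exfalso
          rcases (hchar.2 j hlego).1 v ((hmemR v).2 ⟨h1, h2⟩) with ⟨k, hk, _⟩
          rw [hvnone] at hk
          simp at hk
      | some l =>
        cases hlego : pvLego (pvMiss X PySem.Set.empty) A with
        | none =>
          exfalso
          rcases hchar.1 hlego with ⟨v, hv, hvnone⟩
          have h0 := (pvIdxList_none A X 1).2 ⟨v, ((hmemR v).1 hv).1, ((hmemR v).1 hv).2, hvnone⟩
          rw [hidx] at h0
          simp at h0
        | some j =>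
          show (match PySem.List.max? l (fun y => y) with | none => -1 | some m => m)
                 = 0 + ((j : Nat) : Int)
          rcases (hchar.2 j hlego).2 with ⟨w, hw, hwj⟩
          have hmemL := pvIdxList_mem A X 1 l hidx
          have hjl : ((j : Nat) : Int) ∈ l :=
            (hmemL _).2 ⟨w, j, ((hmemR w).1 hw).1, ((hmemR w).1 hw).2, hwj, rfl⟩
          have hlne : l ≠ [] := by
            intro h0
            rw [h0] at hjl
            simp at hjl
          cases hmax : PySem.List.max? l (fun y => y) with
          | none =>
            exfalso
            rw [PySem.List.max?_eq_none_iff] at hmax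
            exact hlne hmax
          | some m =>
            have hmmem : m ∈ l := PySem.List.max?_mem hmax
            have hjle : ((j : Nat) : Int) ≤ m := PySem.List.max?_isMax hmax _ hjl
            rcases (hmemL m).1 hmmem with ⟨v, k, h1, h2, hk, hmk⟩
            rcases (hchar.2 j hlego).1 v ((hmemR v).2 ⟨h1, h2⟩) with ⟨k2, hk2, hk2le⟩
            rw [hk] at hk2
            injection hk2 with hkk
            subst hkk
            show m = 0 + ((j : Nat) : Int)
            omega
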